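-- pv_equiv track=rewrite | github.com/namy112/birthAnalysysInUS | exploringUSBirth.py | month_birth
-- ===== SOURCE A (Python) =====
-- def month_birth(intergerList):
--     births_per_month={}
--
--     for row in intergerList:
--         day_of_month=row[1]
--         births=row[4]
--
--         if day_of_month in births_per_month.keys():
--             births_per_month[day_of_month]=births_per_month[day_of_month]+ births
--         else:
--             births_per_month[day_of_month]=births
--
--     return births_per_month
-- ===== SOURCE B (Python) =====
-- def month_birth(intergerList):
--     days = list(dict.fromkeys(row[1] for row in intergerList))
--     return {d: sum(row[4] for row in intergerList if row[1] == d) for d in days}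
-- ===== Notes on version B (the rewrite author's own statement) =====
-- stated objective: simpler
-- what changed: Replaces the single-pass running accumulation into a dict by a two-phase grouped comprehension: dedup the day-of-month keys in first-occurrence order, then build the dict with one per-key sum over the rows.
import Mathlib
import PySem

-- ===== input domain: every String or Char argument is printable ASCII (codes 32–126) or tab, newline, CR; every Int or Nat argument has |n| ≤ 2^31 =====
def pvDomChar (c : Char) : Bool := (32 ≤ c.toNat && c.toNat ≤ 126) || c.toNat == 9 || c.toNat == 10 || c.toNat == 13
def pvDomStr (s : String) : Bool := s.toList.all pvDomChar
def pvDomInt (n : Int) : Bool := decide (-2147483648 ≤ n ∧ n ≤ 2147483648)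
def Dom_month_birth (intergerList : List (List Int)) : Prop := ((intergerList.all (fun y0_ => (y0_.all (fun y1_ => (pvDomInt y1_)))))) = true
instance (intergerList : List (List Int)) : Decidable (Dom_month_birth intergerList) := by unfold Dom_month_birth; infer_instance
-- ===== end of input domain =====

-- B replaces A's running dict accumulation by dedup-keys + one grouped sum per key; objective: simpler.

-- shared row accessors: row[1] and row[4]; the .getD 0 fallback is unreachable under Pre_ (rows have length ≥ 5)
def pvDay (row : List Int) : Int := (PySem.List.pyGet? row 1).getD 0
def pvBirths (row : List Int) : Int := (PySem.List.pyGet? row 4).getD 0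

-- ===== PORT A =====
-- literal port: a foldl over the rows accumulating into a PySem.Dict; the in-branch lookup
-- births_per_month[day_of_month] cannot raise (key present), ported as getD 0
def month_birth (intergerList : List (List Int)) : List (Int × Int) :=
  (intergerList.foldl
    (fun births_per_month row =>
      let day_of_month := pvDay row
      let births := pvBirths row
      if day_of_month ∈ births_per_month.keys then
        births_per_month.insert day_of_month (births_per_month.getD day_of_month 0 + births)
      else
        births_per_month.insert day_of_month births)
    (PySem.Dict.empty : PySem.Dict Int Int)).items

-- ===== PORT B =====
-- port of Source B: dict.fromkeys dedup of the day column, then one sum per key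
def month_birth_alt (intergerList : List (List Int)) : List (Int × Int) :=
  let days := PySem.List.dedup (intergerList.map (fun row => pvDay row))
  days.map (fun d =>
    (d, ((intergerList.filter (fun row => pvDay row == d)).map (fun row => pvBirths row)).sum))

-- ===== PRECONDITION & SPEC =====
-- Pre_ excludes exactly the inputs where A raises IndexError: a row shorter than 5 elements
def Pre_month_birth (intergerList : List (List Int)) : Prop :=
  ∀ row ∈ intergerList, 5 ≤ row.length
instance (intergerList : List (List Int)) : Decidable (Pre_month_birth intergerList) := by
  unfold Pre_month_birth; infer_instance
def pvWitness_month_birth : List (List Int) := [[0, 3, 2, 1, 10], [9, 3, 0, 0, 5], [1, 7, 0, 0, 2]]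

def Spec_month_birth (intergerList : List (List Int)) (out : List (Int × Int)) : Prop := out = month_birth_alt intergerList
instance (intergerList : List (List Int)) (out : List (Int × Int)) : Decidable (Spec_month_birth intergerList out) := by unfold Spec_month_birth; infer_instance

-- ===== CLAIM (what is proved, stated in full; the proofs are below) =====
def Claim_equal_month_birth : Prop := ∀ (intergerList : List (List Int)), Dom_month_birth intergerList → Pre_month_birth intergerList → Spec_month_birth intergerList (month_birth intergerList)

-- ===== LEMMAS AND PROOFS =====

-- A's loop body always overwrites the entry at pvDay row with (old value or 0) + births
theorem pv_step_eq (d : PySem.Dict Int Int) (row : List Int) :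
    (if pvDay row ∈ d.keys then
        d.insert (pvDay row) (d.getD (pvDay row) 0 + pvBirths row)
      else
        d.insert (pvDay row) (pvBirths row))
    = d.insert (pvDay row) (d.getD (pvDay row) 0 + pvBirths row) := by
  split
  · rfl
  · rename_i h
    rw [PySem.Dict.getD_of_not_contains, zero_add]
    by_contra hc
    exact h ((PySem.Dict.contains_iff_mem_keys d (pvDay row)).mp (by simpa using hc))

theorem pv_getD_foldl (l : List (List Int)) (d : PySem.Dict Int Int) (k : Int) :
    (l.foldl (fun d row => d.insert (pvDay row) (d.getD (pvDay row) 0 + pvBirths row)) d).getD k 0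
    = d.getD k 0 + ((l.filter (fun row => pvDay row == k)).map (fun row => pvBirths row)).sum := by
  induction l generalizing d with
  | nil => simp
  | cons r t ih =>
    simp only [List.foldl_cons, ih, List.filter_cons]
    by_cases h : pvDay r = k
    · subst h
      rw [PySem.Dict.getD_insert_self]
      simp [add_assoc]
    · rw [PySem.Dict.getD_insert, if_neg (fun e => h e.symm)]
      simp [h]

theorem month_birth_eq_alt (l : List (List Int)) :
    month_birth l = month_birth_alt l := by
  unfold month_birth month_birth_alt
  have hstep : (fun (births_per_month : PySem.Dict Int Int) (row : List Int) =>
      let day_of_month := pvDay row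
      let births := pvBirths row
      if day_of_month ∈ births_per_month.keys then
        births_per_month.insert day_of_month (births_per_month.getD day_of_month 0 + births)
      else
        births_per_month.insert day_of_month births)
      = (fun d row => d.insert (pvDay row) (d.getD (pvDay row) 0 + pvBirths row)) := by
    funext d row
    exact pv_step_eq d row
  rw [hstep]
  set D := l.foldl (fun d row => d.insert (pvDay row) (d.getD (pvDay row) 0 + pvBirths row))
    (PySem.Dict.empty : PySem.Dict Int Int) with hD
  have hnd : D.keys.Nodup := by
    rw [hD]
    exact PySem.Dict.nodup_keys_foldl_insert_key l (fun row => pvDay row) _ _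
      PySem.Dict.nodup_keys_empty
  have hkeys : D.keys = PySem.List.dedup (l.map (fun row => pvDay row)) := by
    rw [hD, PySem.Dict.keys_foldl_insert_key]
    simp [PySem.Set.update_nil_left]
  rw [PySem.Dict.items_eq_map_keys D hnd 0, hkeys]
  apply List.map_congr_left
  intro k _
  have := pv_getD_foldl l (PySem.Dict.empty : PySem.Dict Int Int) k
  rw [← hD] at this
  simp [this]

-- ===== VERDICT (by name: the statement is the Claim_ definition above) =====
theorem month_birth_spec : Claim_equal_month_birth := by
  intro l _ _
  exact month_birth_eq_alt l
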